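-- pv_equiv track=rewrite | github.com/prohvat1979/divingpyt6 | task3.py | _make_all_diagonal
-- ===== SOURCE A (Python) =====
-- from typing import List, Tuple
--
-- def _make_all_diagonal(desk: List[List[int]]) -> List[List[int]]:
--     n = len(desk)
--     all_diags = []
--
--     main, second = _check_main_diagonal(desk)
--     all_diags.append(main)
--     all_diags.append(second)
--
--     for distance in range(1, n):
--         sum_tl = n - 1 - distance
--         sum_br = n - 1 + distance
--
--         all_diags.append([desk[i][sum_tl - i] for i in range(n - distance)])
--         all_diags.append([desk[i][sum_br - i] for i in range(distance, n)])
--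
--     return all_diags
--
-- def _check_main_diagonal(desk: List[List[int]]) -> Tuple[List[int], List[int]]:
--     main_diag = [desk[i][i] for i in range(len(desk))]
--     secondary_diagonal = [desk[i][len(desk) - i - 1] for i in range(len(desk))]
--     return main_diag, secondary_diagonal
-- ===== SOURCE B (Python) =====
-- from typing import List
--
-- def _make_all_diagonal(desk: List[List[int]]) -> List[List[int]]:
--     n = len(desk)
--     # one row-major pass: bucket desk[i][j] by anti-diagonal index i + j
--     buckets = [[] for _ in range(2 * n - 1)]
--     for i, row in enumerate(desk):
--         for j in range(n):
--             buckets[i + j].append(row[j])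
--     result = [[desk[i][i] for i in range(n)]]
--     result.append(buckets[n - 1] if n else [])
--     for d in range(1, n):
--         result.append(buckets[n - 1 - d])
--         result.append(buckets[n - 1 + d])
--     return result
-- ===== Notes on version B (the rewrite author's own statement) =====
-- stated objective: alternative
-- what changed: Replaces A's per-diagonal extraction (a loop over distances, each building two diagonals by index arithmetic) with a single row-major pass that buckets every element by its anti-diagonal index i+j into a 2n-1 table, then assembles the buckets in A's output order.
import Mathlib
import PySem

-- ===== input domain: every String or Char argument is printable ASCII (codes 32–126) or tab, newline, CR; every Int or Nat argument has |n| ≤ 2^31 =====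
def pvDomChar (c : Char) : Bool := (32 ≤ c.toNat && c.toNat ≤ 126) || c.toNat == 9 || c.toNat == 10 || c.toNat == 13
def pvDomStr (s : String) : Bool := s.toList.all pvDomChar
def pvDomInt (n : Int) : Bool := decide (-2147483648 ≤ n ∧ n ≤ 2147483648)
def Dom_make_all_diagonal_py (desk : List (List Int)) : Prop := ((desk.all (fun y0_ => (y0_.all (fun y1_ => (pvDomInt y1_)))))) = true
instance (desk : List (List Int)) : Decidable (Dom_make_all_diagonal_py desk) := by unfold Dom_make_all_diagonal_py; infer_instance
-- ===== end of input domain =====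

-- B replaces A's per-diagonal extraction loops by a single row-major pass that buckets
-- each element by its anti-diagonal index i+j, then assembles the buckets in A's order
-- (objective: alternative decomposition, same asymptotic cost).

-- ===== PORT A =====
-- desk[i][j] with Int indices; Pre_ keeps every access in range, so the defaults are never used
def pvGet (desk : List (List Int)) (i j : Int) : Int :=
  PySem.List.pyGetD (PySem.List.pyGetD desk i []) j 0

-- helper _check_main_diagonal of A
def check_main_diagonal_py (desk : List (List Int)) : List Int × List Int :=
  ((PySem.List.pyRange 0 (desk.length : Int) 1).map (fun i => pvGet desk i i),
   (PySem.List.pyRange 0 (desk.length : Int) 1).map (fun i => pvGet desk i ((desk.length : Int) - i - 1)))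

def make_all_diagonal_py (desk : List (List Int)) : List (List Int) :=
  let n : Int := desk.length
  let md := check_main_diagonal_py desk
  (PySem.List.pyRange 1 n 1).foldl (fun acc distance =>
    let sum_tl := n - 1 - distance
    let sum_br := n - 1 + distance
    (acc ++ [(PySem.List.pyRange 0 (n - distance) 1).map (fun i => pvGet desk i (sum_tl - i))])
        ++ [(PySem.List.pyRange distance n 1).map (fun i => pvGet desk i (sum_br - i))])
    [md.1, md.2]

-- ===== PORT B =====
-- buckets[k].append(x) : append x to the k-th inner list (Python index k is always in range in B)
def pvAppendAt : List (List Int) → Int → Int → List (List Int)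
  | [], _, _ => []
  | b :: bs, k, x => if k = 0 then (b ++ [x]) :: bs else b :: pvAppendAt bs (k - 1) x

def make_all_diagonal_py_alt (desk : List (List Int)) : List (List Int) :=
  let n := desk.length
  let buckets := (PySem.List.enumerate desk).foldl
    (fun bs p => (PySem.List.pyRange 0 (n : Int) 1).foldl
        (fun bs j => pvAppendAt bs (p.1 + j) (PySem.List.pyGetD p.2 j 0)) bs)
    (List.replicate (2 * n - 1) [])
  let result := [(PySem.List.pyRange 0 (n : Int) 1).map (fun i => pvGet desk i i)] ++
    [if n ≠ 0 then PySem.List.pyGetD buckets ((n : Int) - 1) [] else []]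
  (PySem.List.pyRange 1 (n : Int) 1).foldl (fun res d =>
     (res ++ [PySem.List.pyGetD buckets ((n : Int) - 1 - d) []])
       ++ [PySem.List.pyGetD buckets ((n : Int) - 1 + d) []]) result

-- ===== PRECONDITION & SPEC =====
-- Pre_ excludes exactly the inputs where Python A raises IndexError: some row shorter than the matrix height.
def Pre_make_all_diagonal_py (desk : List (List Int)) : Prop :=
  ∀ row ∈ desk, desk.length ≤ row.length
instance (desk : List (List Int)) : Decidable (Pre_make_all_diagonal_py desk) := by
  unfold Pre_make_all_diagonal_py; infer_instance

def pvWitness_make_all_diagonal_py : List (List Int) := [[1, 2], [3, 4]]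

def Spec_make_all_diagonal_py (desk : List (List Int)) (out : List (List Int)) : Prop := out = make_all_diagonal_py_alt desk
instance (desk : List (List Int)) (out : List (List Int)) : Decidable (Spec_make_all_diagonal_py desk out) := by unfold Spec_make_all_diagonal_py; infer_instance

-- ===== CLAIM (what is proved, stated in full; the proofs are below) =====
def Claim_equal_make_all_diagonal_py : Prop := ∀ (desk : List (List Int)), Dom_make_all_diagonal_py desk → Pre_make_all_diagonal_py desk → Spec_make_all_diagonal_py desk (make_all_diagonal_py desk)

-- ===== LEMMAS AND PROOFS =====

-- the elements appended to bucket s while processing rows whose indices start at a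
def pvContrib (n : Nat) : List (List Int) → Int → Int → List Int
  | [], _, _ => []
  | r :: rs, a, s =>
      (if a ≤ s ∧ s < a + n then [PySem.List.pyGetD r (s - a) 0] else []) ++ pvContrib n rs (a + 1) s

theorem pvAppendAt_getElem? (bs : List (List Int)) (k : Int) (x : Int) (s : Nat) :
    (pvAppendAt bs k x)[s]? = if (s : Int) = k then bs[s]?.map (· ++ [x]) else bs[s]? := by
  induction bs generalizing k s with
  | nil => simp [pvAppendAt]
  | cons b bs ih =>
    rw [pvAppendAt]
    by_cases hk : k = 0
    · rw [if_pos hk]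
      cases s with
      | zero => rw [if_pos (by omega)]; rfl
      | succ s => simp only [List.getElem?_cons_succ]; rw [if_neg (by omega)]
    · rw [if_neg hk]
      cases s with
      | zero => simp only [List.getElem?_cons_zero]; rw [if_neg (by omega)]
      | succ s =>
        simp only [List.getElem?_cons_succ, ih (k - 1) s]
        by_cases h : (s : Int) = k - 1
        · rw [if_pos h, if_pos (by omega)]
        · rw [if_neg h, if_neg (by omega)]

theorem pv_inner_getElem? (n : Nat) (i : Int) (row : List Int) (bs : List (List Int)) (s : Nat) :
    ((PySem.List.pyRange 0 (n : Int) 1).foldl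
        (fun bs j => pvAppendAt bs (i + j) (PySem.List.pyGetD row j 0)) bs)[s]?
      = if i ≤ (s : Int) ∧ (s : Int) < i + n then
          bs[s]?.map (· ++ [PySem.List.pyGetD row ((s : Int) - i) 0]) else bs[s]? := by
  induction n generalizing bs with
  | zero =>
    rw [PySem.List.pyRange_one_eq_nil (by omega)]
    simp only [List.foldl_nil]
    rw [if_neg (by omega)]
  | succ n ih =>
    have hsplit : PySem.List.pyRange 0 ((n + 1 : Nat) : Int) 1
        = PySem.List.pyRange 0 (n : Int) 1 ++ [(n : Int)] := by
      push_cast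
      exact PySem.List.pyRange_one_succ_right (by omega)
    rw [hsplit, List.foldl_append]
    simp only [List.foldl_cons, List.foldl_nil]
    rw [pvAppendAt_getElem?, ih]
    by_cases h1 : (s : Int) = i + n
    · rw [if_pos h1, if_neg (by omega), if_pos (by constructor <;> omega)]
      rw [show (n : Int) = (s : Int) - i from by omega]
    · rw [if_neg h1]
      by_cases h2 : i ≤ (s : Int) ∧ (s : Int) < i + n
      · rw [if_pos h2, if_pos (by obtain ⟨l, r⟩ := h2; constructor <;> omega)]
      · rw [if_neg h2, if_neg (by rw [not_and_or] at h2 ⊢; omega)]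

theorem pv_outer_getElem? (n : Nat) (rows : List (List Int)) (a : Int) (bs : List (List Int)) (s : Nat) :
    ((PySem.List.enumerate rows a).foldl
        (fun bs p => (PySem.List.pyRange 0 (n : Int) 1).foldl
            (fun bs j => pvAppendAt bs (p.1 + j) (PySem.List.pyGetD p.2 j 0)) bs) bs)[s]?
      = bs[s]?.map (· ++ pvContrib n rows a (s : Int)) := by
  induction rows generalizing a bs with
  | nil =>
    simp [PySem.List.enumerate, pvContrib]
  | cons r rs ih =>
    rw [PySem.List.enumerate_cons]
    simp only [List.foldl_cons]
    rw [ih, pv_inner_getElem?, pvContrib]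
    by_cases h : a ≤ (s : Int) ∧ (s : Int) < a + n
    · rw [if_pos h, if_pos h]
      cases bs[s]? <;> simp
    · rw [if_neg h, if_neg h]
      cases bs[s]? <;> simp

theorem pv_pyGetD_cons_pos {α : Type} (x : α) (xs : List α) (i : Int) (d : α) (h : 0 < i) :
    PySem.List.pyGetD (x :: xs) i d = PySem.List.pyGetD xs (i - 1) d := by
  rw [PySem.List.pyGetD_of_nonneg _ _ (by omega), PySem.List.pyGetD_of_nonneg _ _ (by omega),
      show i.toNat = (i - 1).toNat + 1 from by omega]
  rfl

theorem pvContrib_eq (n : Nat) (rows : List (List Int)) : ∀ (a s : Int),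
    pvContrib n rows a s
      = (PySem.List.pyRange (max a (s + 1 - n)) (min (s + 1) (a + rows.length)) 1).map
          (fun i => PySem.List.pyGetD (PySem.List.pyGetD rows (i - a) []) (s - i) 0) := by
  induction rows with
  | nil =>
    intro a s
    rw [pvContrib, PySem.List.pyRange_one_eq_nil (by simp)]
    rfl
  | cons r rs ih =>
    intro a s
    rw [pvContrib]
    simp only [List.length_cons]
    by_cases hc : a ≤ s ∧ s < a + n
    · rw [if_pos hc]
      rw [show max a (s + 1 - n) = a from by omega]
      rw [PySem.List.pyRange_one_cons (by omega), List.map_cons, List.singleton_append]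
      congr 1
      · rw [show a - a = (0 : Int) from by ring,
            PySem.List.pyGetD_eq_getElem _ _ (le_refl 0) (by simp)]
        simp
      · rw [ih (a + 1) s, show max (a + 1) (s + 1 - n) = a + 1 from by omega,
            show (a + 1 + (rs.length : Int)) = a + (rs.length + 1) from by ring]
        apply List.map_congr_left
        intro i hi
        rw [PySem.List.mem_pyRange_one] at hi
        rw [pv_pyGetD_cons_pos _ _ _ _ (by omega),
            show i - a - 1 = i - (a + 1) from by ring]
    · rw [if_neg hc, List.nil_append, ih (a + 1) s]
      by_cases hs : s < a
      · rw [PySem.List.pyRange_one_eq_nil (by omega),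
            PySem.List.pyRange_one_eq_nil (by omega)]
        rfl
      · rw [show max (a + 1) (s + 1 - n) = max a (s + 1 - n) from by omega,
            show (a + 1 + (rs.length : Int)) = a + (rs.length + 1) from by ring]
        apply List.map_congr_left
        intro i hi
        rw [PySem.List.mem_pyRange_one] at hi
        rw [pv_pyGetD_cons_pos _ _ _ _ (by omega),
            show i - a - 1 = i - (a + 1) from by ring]

theorem pv_bucket_val (desk : List (List Int)) (s : Int) (h0 : 0 ≤ s)
    (h1 : s < 2 * (desk.length : Int) - 1) :
    PySem.List.pyGetD ((PySem.List.enumerate desk).foldl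
        (fun bs p => (PySem.List.pyRange 0 (desk.length : Int) 1).foldl
            (fun bs j => pvAppendAt bs (p.1 + j) (PySem.List.pyGetD p.2 j 0)) bs)
        (List.replicate (2 * desk.length - 1) [])) s []
      = (PySem.List.pyRange (max 0 (s + 1 - desk.length)) (min (s + 1) (desk.length : Int)) 1).map
          (fun i => pvGet desk i (s - i)) := by
  rw [PySem.List.pyGetD_of_nonneg _ _ h0, List.getD_eq_getElem?_getD,
      pv_outer_getElem? desk.length desk 0 _ s.toNat,
      List.getElem?_replicate, if_pos (by omega)]
  simp only [Option.map_some, Option.getD_some, List.nil_append]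
  rw [show ((s.toNat : Int)) = s from by omega, pvContrib_eq]
  simp only [zero_add, sub_zero]
  rfl

-- ===== VERDICT (by name: the statement is the Claim_ definition above) =====
theorem make_all_diagonal_py_spec : Claim_equal_make_all_diagonal_py := by
  intro desk _ _
  show make_all_diagonal_py desk = make_all_diagonal_py_alt desk
  by_cases hn : desk.length = 0
  · rw [List.length_eq_zero_iff] at hn
    subst hn
    rfl
  · simp only [make_all_diagonal_py, make_all_diagonal_py_alt, check_main_diagonal_py]
    rw [if_pos hn, List.singleton_append]
    rw [pv_bucket_val desk ((desk.length : Int) - 1) (by omega) (by omega)]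
    rw [show max 0 ((desk.length : Int) - 1 + 1 - desk.length) = 0 from by omega,
        show min ((desk.length : Int) - 1 + 1) (desk.length : Int) = (desk.length : Int) from by omega]
    rw [show (List.map (fun i => pvGet desk i ((desk.length : Int) - 1 - i))
          (PySem.List.pyRange 0 (desk.length : Int) 1))
        = (List.map (fun i => pvGet desk i ((desk.length : Int) - i - 1))
          (PySem.List.pyRange 0 (desk.length : Int) 1)) from by
      apply List.map_congr_left
      intro i _
      rw [show (desk.length : Int) - 1 - i = (desk.length : Int) - i - 1 from by ring]]
    apply PySem.List.foldl_congr_mem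
    intro acc d hd
    rw [PySem.List.mem_pyRange_one] at hd
    rw [pv_bucket_val desk ((desk.length : Int) - 1 - d) (by omega) (by omega),
        pv_bucket_val desk ((desk.length : Int) - 1 + d) (by omega) (by omega)]
    rw [show max 0 ((desk.length : Int) - 1 - d + 1 - desk.length) = 0 from by omega,
        show min ((desk.length : Int) - 1 - d + 1) (desk.length : Int) = (desk.length : Int) - d from by omega,
        show max 0 ((desk.length : Int) - 1 + d + 1 - desk.length) = d from by omega,
        show min ((desk.length : Int) - 1 + d + 1) (desk.length : Int) = (desk.length : Int) from by omega]
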